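-- pv_equiv track=rewrite | github.com/PutriNoratira/CP125-Class-Repo-ty | labs/lab07/exercise3/exercise3.py | compare_prices
-- ===== SOURCE A (Python) =====
-- def compare_prices(store_a, store_b):
--     results = {
--         "only_a" : [],
--         "a_cheaper" : [],
--         "b_cheaper" : []
--     }
--
--     for product, price_a in store_a.items():
--         if product not in store_b:
--             results["only_a"].append(product)
--         else:
--             price_b = store_b[product]
--             if price_a < price_b:
--                 results["a_cheaper"].append(product)
--             elif price_b < price_a:
--                 results["b_cheaper"].append(product)
--
--     results["only_a"].sort()
--     results["a_cheaper"].sort()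
--     results["b_cheaper"].sort()
--
--     return results
-- ===== SOURCE B (Python) =====
-- def compare_prices(store_a, store_b):
--     # sort-merge join: sort both item lists by key once, then advance two
--     # pointers; output lists come out already sorted, no dict lookups needed.
--     a = sorted(store_a.items(), key=lambda kv: kv[0])
--     b = sorted(store_b.items(), key=lambda kv: kv[0])
--     only_a, a_cheaper, b_cheaper = [], [], []
--     j = 0
--     for product, price_a in a:
--         while j < len(b) and b[j][0] < product:
--             j += 1
--         if j == len(b) or b[j][0] != product:
--             only_a.append(product)
--         else:
--             price_b = b[j][1]
--             if price_a < price_b: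
--                 a_cheaper.append(product)
--             elif price_b < price_a:
--                 b_cheaper.append(product)
--             j += 1
--     return {"only_a": only_a, "a_cheaper": a_cheaper, "b_cheaper": b_cheaper}
-- ===== Notes on version B (the rewrite author's own statement) =====
-- stated objective: alternative
-- what changed: Replaces A's dict-membership classifying loop with three post-sorts by a sort-merge join: both item lists are sorted by key once and a two-pointer merge emits the three lists already in sorted order, with no dict lookups and no final sorts.
import Mathlib
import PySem

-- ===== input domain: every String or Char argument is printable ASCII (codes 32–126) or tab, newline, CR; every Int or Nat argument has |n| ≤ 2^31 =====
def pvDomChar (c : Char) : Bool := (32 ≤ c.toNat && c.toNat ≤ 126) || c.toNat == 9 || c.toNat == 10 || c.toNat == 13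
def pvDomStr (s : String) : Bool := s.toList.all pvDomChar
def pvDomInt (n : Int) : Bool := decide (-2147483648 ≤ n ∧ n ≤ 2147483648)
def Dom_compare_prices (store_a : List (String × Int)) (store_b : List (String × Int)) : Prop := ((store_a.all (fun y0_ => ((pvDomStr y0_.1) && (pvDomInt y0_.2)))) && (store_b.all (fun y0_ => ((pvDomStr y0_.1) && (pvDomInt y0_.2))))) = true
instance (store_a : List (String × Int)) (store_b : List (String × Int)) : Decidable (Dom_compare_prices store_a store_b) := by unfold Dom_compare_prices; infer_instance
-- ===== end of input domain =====

-- B replaces A's dict-membership classifying loop + three final sorts by a sort-merge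
-- join over the two item lists sorted by key (alternative algorithm; same return value).


-- ===== PORT A =====
-- the body of A's for-loop (one classifying step over the triple of result lists)
def cpStep (db : PySem.Dict String Int) (acc : List String × List String × List String) (pv : String × Int) : List String × List String × List String :=
  if !(db.contains pv.1) then (acc.1 ++ [pv.1], acc.2.1, acc.2.2)
  else
    let price_b := db.getD pv.1 0
    if pv.2 < price_b then (acc.1, acc.2.1 ++ [pv.1], acc.2.2)
    else if price_b < pv.2 then (acc.1, acc.2.1, acc.2.2 ++ [pv.1])
    else acc

def compare_prices (store_a : List (String × Int)) (store_b : List (String × Int)) : List (String × List String) :=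
  let da := PySem.Dict.ofList store_a
  let db := PySem.Dict.ofList store_b
  let r := da.items.foldl (cpStep db) ([], [], [])
  [("only_a", PySem.List.sorted r.1 (fun x => x) false),
   ("a_cheaper", PySem.List.sorted r.2.1 (fun x => x) false),
   ("b_cheaper", PySem.List.sorted r.2.2 (fun x => x) false)]

-- ===== PORT B =====
-- B's for-loop over the key-sorted a-items: the inner 'while j < len(b) and b[j][0] < product'
-- is dropping the < product prefix of the remaining b-suffix; structural recursion on a.
def cpMerge : List (String × Int) → List (String × Int) → List String × List String × List String
  | [], _ => ([], [], [])
  | x :: xs, b =>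
    match b.dropWhile (fun y => decide (y.1 < x.1)) with
    | [] =>
      let r := cpMerge xs []
      (x.1 :: r.1, r.2.1, r.2.2)
    | y :: ys =>
      if x.1 = y.1 then
        let r := cpMerge xs ys
        if x.2 < y.2 then (r.1, x.1 :: r.2.1, r.2.2)
        else if y.2 < x.2 then (r.1, r.2.1, x.1 :: r.2.2)
        else r
      else
        let r := cpMerge xs (y :: ys)
        (x.1 :: r.1, r.2.1, r.2.2)

def compare_prices_alt (store_a : List (String × Int)) (store_b : List (String × Int)) : List (String × List String) :=
  let da := PySem.Dict.ofList store_a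
  let db := PySem.Dict.ofList store_b
  let a := PySem.List.sorted da.items (fun kv => kv.1) false
  let b := PySem.List.sorted db.items (fun kv => kv.1) false
  let r := cpMerge a b
  [("only_a", r.1), ("a_cheaper", r.2.1), ("b_cheaper", r.2.2)]

-- ===== PRECONDITION & SPEC =====
def Spec_compare_prices (store_a : List (String × Int)) (store_b : List (String × Int)) (out : List (String × List String)) : Prop := out = compare_prices_alt store_a store_b
instance (store_a : List (String × Int)) (store_b : List (String × Int)) (out : List (String × List String)) : Decidable (Spec_compare_prices store_a store_b out) := by unfold Spec_compare_prices; infer_instance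

-- ===== CLAIM (what is proved, stated in full; the proofs are below) =====
def Claim_equal_compare_prices : Prop := ∀ (store_a : List (String × Int)) (store_b : List (String × Int)), Dom_compare_prices store_a store_b → Spec_compare_prices store_a store_b (compare_prices store_a store_b)

-- ===== LEMMAS AND PROOFS =====

-- first-match association lookup, the reference semantics both sides are reduced to
def cpLookup (k : String) : List (String × Int) → Option Int
  | [] => none
  | y :: ys => if y.1 = k then some y.2 else cpLookup k ys

def cpOnly (b : List (String × Int)) (x : String × Int) : Bool := (cpLookup x.1 b).isNone
def cpLt (b : List (String × Int)) (x : String × Int) : Bool :=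
  match cpLookup x.1 b with | some v => decide (x.2 < v) | none => false
def cpGt (b : List (String × Int)) (x : String × Int) : Bool :=
  match cpLookup x.1 b with | some v => decide (v < x.2) | none => false

lemma cpLookup_eq_none_iff (k : String) (l : List (String × Int)) :
    cpLookup k l = none ↔ k ∉ l.map Prod.fst := by
  induction l with
  | nil => simp [cpLookup]
  | cons y ys ih =>
    by_cases h : y.1 = k <;> simp [cpLookup, h, ih, Ne.symm, eq_comm]

lemma cpLookup_dropWhile (k : String) (p : String × Int → Bool) (l : List (String × Int))
    (h : ∀ y ∈ l.takeWhile p, y.1 ≠ k) :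
    cpLookup k l = cpLookup k (l.dropWhile p) := by
  induction l with
  | nil => rfl
  | cons y ys ih =>
    by_cases hp : p y
    · have hk : y.1 ≠ k := h y (by simp [hp])
      have := ih (fun z hz => h z (by simp [hp, hz]))
      simp [cpLookup, hk, hp, this]
    · simp [hp]

-- A's loop leaves, in each of the three accumulators, the matching filter of the items list
lemma cp_fold_spec (db : PySem.Dict String Int) (l : List (String × Int))
    (oa ac bc : List String) :
    l.foldl (cpStep db) (oa, ac, bc) =
      (oa ++ (l.filter (fun x => !db.contains x.1)).map Prod.fst,
       ac ++ (l.filter (fun x => db.contains x.1 && decide (x.2 < db.getD x.1 0))).map Prod.fst,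
       bc ++ (l.filter (fun x => db.contains x.1 && decide (db.getD x.1 0 < x.2))).map Prod.fst) := by
  induction l generalizing oa ac bc with
  | nil => simp
  | cons x xs ih =>
    simp only [List.foldl_cons, cpStep, List.filter_cons]
    by_cases h1 : db.contains x.1
    · by_cases h2 : x.2 < db.getD x.1 0
      · have h3 : ¬ db.getD x.1 0 < x.2 := by omega
        simp [h1, h2, h3, ih]
      · by_cases h3 : db.getD x.1 0 < x.2
        · simp [h1, h2, h3, ih]
        · simp [h1, h2, h3, ih]
    · simp [h1, ih]

-- the merge, on key-sorted inputs, computes the three filters of a against lookup in b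
lemma cpMerge_spec (a b : List (String × Int))
    (ha : (a.map Prod.fst).Pairwise (· < ·)) (hb : (b.map Prod.fst).Pairwise (· < ·)) :
    cpMerge a b = ((a.filter (cpOnly b)).map Prod.fst,
                   (a.filter (cpLt b)).map Prod.fst,
                   (a.filter (cpGt b)).map Prod.fst) := by
  induction a generalizing b with
  | nil => simp [cpMerge]
  | cons x xs ih =>
    have hxgt : ∀ z ∈ xs, x.1 < z.1 := by
      rw [List.map_cons, List.pairwise_cons] at ha
      intro z hz; exact ha.1 z.1 (List.mem_map_of_mem hz)
    have ha' : (xs.map Prod.fst).Pairwise (· < ·) := by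
      rw [List.map_cons, List.pairwise_cons] at ha; exact ha.2
    have htake : ∀ y ∈ b.takeWhile (fun y => decide (y.1 < x.1)), y.1 < x.1 := by
      intro y hy
      have := List.mem_takeWhile_imp hy
      simpa using this
    -- lookup of any key ≥ x.1 is unchanged by dropping the < x.1 prefix
    have hdropLk : ∀ k, x.1 ≤ k →
        cpLookup k b = cpLookup k (b.dropWhile (fun y => decide (y.1 < x.1))) := by
      intro k hk
      exact cpLookup_dropWhile k _ b (fun y hy => by
        have := htake y hy; exact ne_of_lt (lt_of_lt_of_le this hk))
    have hbd : ((b.dropWhile (fun y => decide (y.1 < x.1))).map Prod.fst).Pairwise (· < ·) :=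
      (List.Pairwise.sublist (List.Sublist.map Prod.fst (List.dropWhile_sublist _)) hb)
    simp only [cpMerge]
    cases hd : b.dropWhile (fun y => decide (y.1 < x.1)) with
    | nil =>
      -- b exhausted: x and everything after it is only in a
      have hnone : ∀ k, x.1 ≤ k → cpLookup k b = none := by
        intro k hk; rw [hdropLk k hk, hd]; rfl
      have hcongr : ∀ (p q : (String × Int) → Bool),
          (∀ z, cpLookup z.1 b = cpLookup z.1 ([] : List (String × Int)) → p z = q z) →
          xs.filter p = xs.filter q := by
        intro p q hpq
        exact List.filter_congr (fun z hz => hpq z (by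
          rw [hnone z.1 (le_of_lt (hxgt z hz))]; rfl))
      rw [ih [] ha' (by simp)]
      have e1 : xs.filter (cpOnly []) = xs.filter (cpOnly b) :=
        (hcongr (cpOnly b) (cpOnly []) (fun z h => by simp [cpOnly, h])).symm
      have e2 : xs.filter (cpLt []) = xs.filter (cpLt b) :=
        (hcongr (cpLt b) (cpLt []) (fun z h => by simp [cpLt, h])).symm
      have e3 : xs.filter (cpGt []) = xs.filter (cpGt b) :=
        (hcongr (cpGt b) (cpGt []) (fun z h => by simp [cpGt, h])).symm
      have hx : cpLookup x.1 b = none := hnone x.1 le_rfl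
      simp [cpOnly, cpLt, cpGt, hx, e1, e2, e3]
    | cons y ys =>
      simp only []
      have hyLk : cpLookup x.1 b = cpLookup x.1 (y :: ys) := by
        rw [hdropLk x.1 le_rfl, hd]
      have hysPW : (ys.map Prod.fst).Pairwise (· < ·) := by
        rw [hd] at hbd; rw [List.map_cons, List.pairwise_cons] at hbd; exact hbd.2
      by_cases hxy : x.1 = y.1
      · -- matched key: classify x by price, recurse past both
        have hxLk : cpLookup x.1 b = some y.2 := by
          rw [hyLk]; simp [cpLookup, hxy.symm]
        have hTailLk : ∀ k, x.1 < k → cpLookup k b = cpLookup k ys := by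
          intro k hk
          rw [hdropLk k (le_of_lt hk), hd]
          have : y.1 ≠ k := by rw [← hxy]; exact ne_of_lt hk
          simp [cpLookup, this]
        have hcongr : ∀ (p q : (String × Int) → Bool),
            (∀ z, cpLookup z.1 b = cpLookup z.1 ys → p z = q z) →
            xs.filter p = xs.filter q := by
          intro p q hpq
          exact List.filter_congr (fun z hz => hpq z (hTailLk z.1 (hxgt z hz)))
        rw [ih ys ha' hysPW]
        have e1 : xs.filter (cpOnly ys) = xs.filter (cpOnly b) :=
          (hcongr (cpOnly b) (cpOnly ys) (fun z h => by simp [cpOnly, h])).symm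
        have e2 : xs.filter (cpLt ys) = xs.filter (cpLt b) :=
          (hcongr (cpLt b) (cpLt ys) (fun z h => by simp [cpLt, h])).symm
        have e3 : xs.filter (cpGt ys) = xs.filter (cpGt b) :=
          (hcongr (cpGt b) (cpGt ys) (fun z h => by simp [cpGt, h])).symm
        rw [hxy] at hxLk
        by_cases hlt : x.2 < y.2
        · have hgt : ¬ y.2 < x.2 := by omega
          simp [hxy, hlt, cpOnly, cpLt, cpGt, hxLk, hgt, e1, e2, e3]
        · by_cases hgt : y.2 < x.2
          · simp [hxy, hlt, hgt, cpOnly, cpLt, cpGt, hxLk, e1, e2, e3]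
          · simp [hxy, hlt, hgt, cpOnly, cpLt, cpGt, hxLk, e1, e2, e3]
      · -- x.1 < y.1 (the drop stopped at y without matching): x is only in a
        have hxlt : ¬ y.1 < x.1 := by
          have := List.head?_dropWhile_not (fun y => decide (y.1 < x.1)) b
          rw [hd] at this; simpa using this
        have hxLk : cpLookup x.1 b = none := by
          rw [hyLk, cpLookup_eq_none_iff]
          rw [List.map_cons]
          intro hmem
          rcases List.mem_cons.mp hmem with h | h
          · exact hxy h
          · -- x.1 ∈ ys.map fst, but all of those are > y.1 ≥ x.1 — contradiction
            rw [hd] at hbd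
            rw [List.map_cons, List.pairwise_cons] at hbd
            have := hbd.1 x.1 h
            have hle : x.1 ≤ y.1 := le_of_not_gt hxlt
            exact absurd (lt_of_le_of_lt hle this) (lt_irrefl x.1)
        have hTailLk : ∀ k, x.1 < k → cpLookup k b = cpLookup k (y :: ys) := by
          intro k hk; exact hdropLk k (le_of_lt hk) |>.trans (by rw [hd])
        have hcongr : ∀ (p q : (String × Int) → Bool),
            (∀ z, cpLookup z.1 b = cpLookup z.1 (y :: ys) → p z = q z) →
            xs.filter p = xs.filter q := by
          intro p q hpq
          exact List.filter_congr (fun z hz => hpq z (hTailLk z.1 (hxgt z hz)))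
        rw [if_neg hxy, ih (y :: ys) ha' (by rw [← hd]; exact hbd)]
        have e1 : xs.filter (cpOnly (y :: ys)) = xs.filter (cpOnly b) :=
          (hcongr (cpOnly b) (cpOnly (y :: ys)) (fun z h => by simp [cpOnly, h])).symm
        have e2 : xs.filter (cpLt (y :: ys)) = xs.filter (cpLt b) :=
          (hcongr (cpLt b) (cpLt (y :: ys)) (fun z h => by simp [cpLt, h])).symm
        have e3 : xs.filter (cpGt (y :: ys)) = xs.filter (cpGt b) :=
          (hcongr (cpGt b) (cpGt (y :: ys)) (fun z h => by simp [cpGt, h])).symm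
        simp [cpOnly, cpLt, cpGt, hxLk, e1, e2, e3]

-- cpLookup in any Nodup-key permutation of db.items IS db.get?
lemma cpLookup_eq_get? (db : PySem.Dict String Int) (l : List (String × Int))
    (hperm : l.Perm db.items) (hnd : db.keys.Nodup) (k : String) :
    cpLookup k l = db.get? k := by
  cases hg : db.get? k with
  | none =>
    rw [cpLookup_eq_none_iff]
    intro hmem
    rcases List.mem_map.mp hmem with ⟨p, hp, hpk⟩
    have : p ∈ db.items := hperm.subset hp
    have : p.1 ∈ db.keys := PySem.Dict.mem_keys_of_mem_items db this
    rw [hpk] at this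
    exact absurd hg (by rw [PySem.Dict.get?_eq_none_iff_not_mem_keys db k] at hg; tauto)
  | some v =>
    have hmem : (k, v) ∈ l := hperm.mem_iff.mpr (PySem.Dict.mem_items_of_get?_eq_some db hg)
    -- first match in l is (k, v): keys in l are Nodup, so the match is unique
    have hndl : (l.map Prod.fst).Nodup := by
      have : db.items.map Prod.fst = db.keys := rfl
      exact ((hperm.map Prod.fst).nodup_iff).mpr (this ▸ hnd)
    clear hperm hg
    induction l with
    | nil => cases hmem
    | cons z zs ih =>
      rcases List.mem_cons.mp hmem with h | h
      · simp [cpLookup, ← h]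
      · have hzk : z.1 ≠ k := by
          rw [List.map_cons, List.nodup_cons] at hndl
          intro he; exact hndl.1 (he ▸ List.mem_map_of_mem h)
        have := ih h (by rw [List.map_cons, List.nodup_cons] at hndl; exact hndl.2)
        simp [cpLookup, hzk, this]

-- ===== VERDICT (by name: the statement is the Claim_ definition above) =====
theorem compare_prices_spec : Claim_equal_compare_prices := by
  intro store_a store_b _
  show compare_prices store_a store_b = compare_prices_alt store_a store_b
  simp only [compare_prices, compare_prices_alt, cp_fold_spec, List.nil_append]
  set da := PySem.Dict.ofList store_a with hda
  set db := PySem.Dict.ofList store_b with hdb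
  have nda := PySem.Dict.nodup_keys_ofList store_a
  have ndb := PySem.Dict.nodup_keys_ofList store_b
  rw [← hda] at nda; rw [← hdb] at ndb
  set a := PySem.List.sorted da.items (fun kv => kv.1) false with hA
  set b := PySem.List.sorted db.items (fun kv => kv.1) false with hB
  have hpa : a.Perm da.items := PySem.List.sorted_perm da.items (fun kv => kv.1) false
  have hpb : b.Perm db.items := PySem.List.sorted_perm db.items (fun kv => kv.1) false
  -- key lists of a and b are strictly increasing: sorted (≤ by key) + Nodup keys
  have strict : ∀ (l : List (String × Int)) (d : PySem.Dict String Int),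
      l.Perm d.items → d.keys.Nodup → l.Pairwise (fun p q => p.1 ≤ q.1) →
      (l.map Prod.fst).Pairwise (· < ·) := by
    intro l d hp hnd hle
    have hndl : (l.map Prod.fst).Nodup := by
      have : d.items.map Prod.fst = d.keys := rfl
      exact ((hp.map Prod.fst).nodup_iff).mpr (this ▸ hnd)
    have h1 : (l.map Prod.fst).Pairwise (· ≤ ·) := List.pairwise_map.mpr hle
    exact (h1.and hndl).imp (fun h => lt_of_le_of_ne h.1 h.2)
  have hsa : (a.map Prod.fst).Pairwise (· < ·) :=
    strict a da hpa nda (PySem.List.sorted_pairwise da.items (fun kv => kv.1))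
  have hsb : (b.map Prod.fst).Pairwise (· < ·) :=
    strict b db hpb ndb (PySem.List.sorted_pairwise db.items (fun kv => kv.1))
  rw [cpMerge_spec a b hsa hsb]
  -- align B's filter predicates (via cpLookup in b) with A's (via db)
  have hlk : ∀ k, cpLookup k b = db.get? k := cpLookup_eq_get? db b hpb ndb
  have pe1 : ∀ z : String × Int, cpOnly b z = !db.contains z.1 := by
    intro z
    rw [cpOnly, hlk, PySem.Dict.contains_eq_isSome_get? db z.1]
    cases db.get? z.1 <;> rfl
  have pe2 : ∀ z : String × Int, cpLt b z = (db.contains z.1 && decide (z.2 < db.getD z.1 0)) := by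
    intro z
    rw [cpLt, PySem.Dict.contains_eq_isSome_get? db z.1, PySem.Dict.getD_eq_get?_getD db z.1 0, hlk]
    cases db.get? z.1 <;> rfl
  have pe3 : ∀ z : String × Int, cpGt b z = (db.contains z.1 && decide (db.getD z.1 0 < z.2)) := by
    intro z
    rw [cpGt, PySem.Dict.contains_eq_isSome_get? db z.1, PySem.Dict.getD_eq_get?_getD db z.1 0, hlk]
    cases db.get? z.1 <;> rfl
  -- each of A's three sorts equals the corresponding (already strictly sorted) merge output
  have sortEq : ∀ (p : String × Int → Bool),
      PySem.List.sorted ((da.items.filter p).map Prod.fst) (fun x => x) false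
        = (a.filter p).map Prod.fst := by
    intro p
    refine PySem.List.sorted_eq_of_perm_of_pairwise_lt _ _ _ ((hpa.filter p).map Prod.fst) ?_
    exact List.Pairwise.sublist (List.Sublist.map Prod.fst List.filter_sublist) hsa
  have f1 : a.filter (cpOnly b) = a.filter (fun x => !db.contains x.1) :=
    List.filter_congr (fun z _ => pe1 z)
  have f2 : a.filter (cpLt b) = a.filter (fun x => db.contains x.1 && decide (x.2 < db.getD x.1 0)) :=
    List.filter_congr (fun z _ => pe2 z)
  have f3 : a.filter (cpGt b) = a.filter (fun x => db.contains x.1 && decide (db.getD x.1 0 < x.2)) :=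
    List.filter_congr (fun z _ => pe3 z)
  rw [sortEq, sortEq, sortEq, f1, f2, f3]
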